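-- pv_equiv track=rewrite | github.com/NaraS91/ICLEsports-Bot | bot/ICLBot.py | fetch_arguments
-- ===== SOURCE A (Python) =====
-- def fetch_arguments(message_content):
--     quote_split = message_content.split('"')
--
--     args = quote_split[0].split()[1:]
--     for i in range(1, len(quote_split)):
--         if i % 2 == 0:
--             if quote_split[i].strip() != "":
--                 args.extend(quote_split[i].split())
--         else:
--             args.append(quote_split[i])
--
--     return args
-- ===== SOURCE B (Python) =====
-- def fetch_arguments(message_content):
--     # one left-to-right scan: in_quote flag, current-token buffer, skip flag for the command word
--     args = []
--     buf = ""
--     in_quote = False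
--     skip_cmd = True
--     for c in message_content:
--         if in_quote:
--             if c == '"':
--                 args.append(buf)
--                 buf = ""
--                 in_quote = False
--             else:
--                 buf += c
--         elif c == '"':
--             if buf:
--                 if not skip_cmd:
--                     args.append(buf)
--                 buf = ""
--             skip_cmd = False
--             in_quote = True
--         elif c.isspace():
--             if buf:
--                 if not skip_cmd:
--                     args.append(buf)
--                 skip_cmd = False
--                 buf = ""
--         else:
--             buf += c
--     if in_quote:
--         args.append(buf)
--     elif buf and not skip_cmd:
--         args.append(buf)
--     return args
-- ===== Notes on version B (the rewrite author's own statement) =====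
-- stated objective: alternative
-- what changed: Replaced A's split-on-quotes followed by an index-parity loop over the segments (with an inner whitespace split per even segment) by a single left-to-right character scan maintaining an in_quote flag, a current-token buffer and a command-word-skip flag.
import Mathlib
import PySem

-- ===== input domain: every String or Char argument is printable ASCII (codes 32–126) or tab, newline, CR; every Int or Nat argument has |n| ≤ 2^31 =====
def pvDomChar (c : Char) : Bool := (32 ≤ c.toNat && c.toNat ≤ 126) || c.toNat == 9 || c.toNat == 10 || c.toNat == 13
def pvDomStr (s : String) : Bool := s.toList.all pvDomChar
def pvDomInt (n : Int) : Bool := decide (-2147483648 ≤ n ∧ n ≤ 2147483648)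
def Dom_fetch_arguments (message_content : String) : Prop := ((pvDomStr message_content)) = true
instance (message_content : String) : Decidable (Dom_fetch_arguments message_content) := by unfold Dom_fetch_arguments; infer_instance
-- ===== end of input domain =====

-- B replaces A's split-on-quotes-then-index-parity loop with a single left-to-right
-- character scan (in_quote flag, token buffer, command-word-skip flag); objective:
-- alternative one-pass decomposition with no intermediate segment lists.

-- ===== PORT A =====
def fetch_arguments (message_content : String) : List String :=
  let quote_split := PySem.Chars.splitOn message_content.toList ['"']
  let args := (PySem.Chars.split₀ (PySem.List.pyGetD quote_split 0 [])).drop 1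
  let args := (PySem.List.pyRange 1 quote_split.length).foldl
      (fun args i =>
        if PySem.Int.mod i 2 == 0 then
          if PySem.Chars.strip (PySem.List.pyGetD quote_split i []) ≠ [] then
            args ++ PySem.Chars.split₀ (PySem.List.pyGetD quote_split i [])
          else args
        else
          args ++ [PySem.List.pyGetD quote_split i []]) args
  args.map String.ofList

-- ===== PORT B =====
-- single scan; state: in_quote, skip_cmd, current buffer, emitted tokens
def scanB : List Char → Bool → Bool → List Char → List (List Char) → List (List Char)
  | [], inq, skip, buf, acc =>
      if inq then acc ++ [buf]
      else if buf ≠ [] ∧ skip = false then acc ++ [buf] else acc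
  | c :: rest, inq, skip, buf, acc =>
      if inq then
        if c = '"' then scanB rest false skip [] (acc ++ [buf])
        else scanB rest true skip (buf ++ [c]) acc
      else if c = '"' then
        scanB rest true false [] (if buf ≠ [] ∧ skip = false then acc ++ [buf] else acc)
      else if PySem.Chars.isspace c then
        if buf ≠ [] then scanB rest false false [] (if skip then acc else acc ++ [buf])
        else scanB rest false skip buf acc
      else scanB rest false skip (buf ++ [c]) acc

def fetch_arguments_alt (message_content : String) : List String :=
  (scanB message_content.toList false true [] []).map String.ofList

-- ===== PRECONDITION & SPEC =====
def Spec_fetch_arguments (message_content : String) (out : List String) : Prop := out = fetch_arguments_alt message_content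
instance (message_content : String) (out : List String) : Decidable (Spec_fetch_arguments message_content out) := by unfold Spec_fetch_arguments; infer_instance

-- ===== CLAIM (what is proved, stated in full; the proofs are below) =====
def Claim_equal_fetch_arguments : Prop := ∀ (message_content : String), Dom_fetch_arguments message_content → Spec_fetch_arguments message_content (fetch_arguments message_content)

-- ===== LEMMAS AND PROOFS =====
def splitQ : List Char → List (List Char)
  | [] => [[]]
  | c :: t => if c = '"' then [] :: splitQ t else (splitQ t).modifyHead (c :: ·)

def joinQ : List (List Char) → List Char
  | [] => []
  | [s] => s
  | s :: ss => s ++ '"' :: joinQ ss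

theorem splitQ_ne_nil (cs : List Char) : splitQ cs ≠ [] := by
  induction cs with
  | nil => simp [splitQ]
  | cons c t ih =>
    simp only [splitQ]
    split
    · simp
    · simpa using ih

theorem splitQ_quote_free (cs : List Char) : ∀ s ∈ splitQ cs, '"' ∉ s := by
  induction cs with
  | nil => simp [splitQ]
  | cons c t ih =>
    simp only [splitQ]
    split
    · intro s hs
      rcases List.mem_cons.mp hs with h | h
      · simp [h]
      · exact ih s h
    · rename_i hc
      obtain ⟨h0, t0, ht⟩ := List.exists_cons_of_ne_nil (splitQ_ne_nil t)
      rw [ht]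
      intro s hs
      rcases List.mem_cons.mp hs with h | h
      · subst h
        have := ih h0 (ht ▸ List.mem_cons_self)
        simp [this, Ne.symm hc]
      · exact ih s (ht ▸ List.mem_cons_of_mem _ h)

theorem joinQ_splitQ (cs : List Char) : joinQ (splitQ cs) = cs := by
  induction cs with
  | nil => simp [splitQ, joinQ]
  | cons c t ih =>
    simp only [splitQ]
    split
    · rename_i hc
      subst hc
      obtain ⟨h0, t0, ht⟩ := List.exists_cons_of_ne_nil (splitQ_ne_nil t)
      rw [ht] at ih ⊢
      cases t0 <;> simp [joinQ] at ih ⊢ <;> simp [ih]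
    · obtain ⟨h0, t0, ht⟩ := List.exists_cons_of_ne_nil (splitQ_ne_nil t)
      rw [ht] at ih ⊢
      cases t0 with
      | nil => simp [joinQ] at ih ⊢; simp [ih]
      | cons a b => simp [joinQ] at ih ⊢; simp [ih]

theorem splitOnGo_eq (cs : List Char) : ∀ (fuel : Nat), cs.length < fuel → ∀ (cur : List Char) (acc : List (List Char)),
    PySem.Chars.splitOn.go ['"'] fuel cs cur acc
      = acc.reverse ++ (splitQ cs).modifyHead (cur.reverse ++ ·) := by
  induction cs with
  | nil =>
    intro fuel hf cur acc
    cases fuel with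
    | zero => omega
    | succ n => simp [PySem.Chars.splitOn.go, splitQ]
  | cons c t ih =>
    intro fuel hf cur acc
    cases fuel with
    | zero => omega
    | succ n =>
      rw [PySem.Chars.splitOn.go]
      by_cases hc : c = '"'
      · subst hc
        simp only [List.isPrefixOf, BEq.rfl, Bool.true_and, if_pos, List.length_singleton,
          List.drop_succ_cons, List.drop_zero]
        rw [ih n (by simpa using hf) [] ((cur.reverse) :: acc)]
        have hid : List.modifyHead (fun x : List Char => x) (splitQ t) = splitQ t := by
          cases splitQ t <;> simp
        simp [splitQ, hid]
      · have hpre : List.isPrefixOf ['"'] (c :: t) = false := by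
          simp [List.isPrefixOf, Ne.symm hc]
        rw [hpre]
        simp only [Bool.false_eq_true, if_false]
        rw [ih n (by simpa using hf) (c :: cur) acc]
        obtain ⟨h0, t0, ht⟩ := List.exists_cons_of_ne_nil (splitQ_ne_nil t)
        simp [splitQ, hc, ht]

theorem splitOn_eq_splitQ (cs : List Char) : PySem.Chars.splitOn cs ['"'] = splitQ cs := by
  rw [PySem.Chars.splitOn, splitOnGo_eq cs (cs.length + 1) (by omega) [] []]
  obtain ⟨h0, t0, ht⟩ := List.exists_cons_of_ne_nil (splitQ_ne_nil cs)
  simp [ht]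

theorem go_acc (cs : List Char) : ∀ (cur : List Char) (acc : List (List Char)),
    PySem.Chars.split₀.go cs cur acc = acc.reverse ++ PySem.Chars.split₀.go cs cur [] := by
  induction cs with
  | nil =>
    intro cur acc
    by_cases h : cur.isEmpty <;> simp [PySem.Chars.split₀.go, h]
  | cons c t ih =>
    intro cur acc
    rw [PySem.Chars.split₀.go, PySem.Chars.split₀.go]
    by_cases hs : PySem.Chars.isspace c
    · by_cases h : cur.isEmpty
      · simp only [hs, h, if_true]
        exact ih [] acc
      · simp only [hs, h, if_true, if_false, Bool.false_eq_true]
        rw [ih [] (cur.reverse :: acc), ih [] [cur.reverse]]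
        simp
    · simp only [hs, Bool.false_eq_true, if_false]
      exact ih (c :: cur) acc

theorem go_word (w : List Char) (hw : ∀ c ∈ w, PySem.Chars.isspace c = false) :
    ∀ (t cur : List Char) (acc : List (List Char)),
    PySem.Chars.split₀.go (w ++ t) cur acc = PySem.Chars.split₀.go t (w.reverse ++ cur) acc := by
  induction w with
  | nil => intro t cur acc; simp only [List.nil_append, List.reverse_nil]
  | cons c w' ih =>
    intro t cur acc
    have hc := hw c (by simp)
    rw [List.cons_append, PySem.Chars.split₀.go]
    simp only [hc, Bool.false_eq_true, if_false]
    rw [ih (fun d hd => hw d (by simp [hd])) t (c :: cur) acc]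
    simp only [List.reverse_cons, List.append_assoc, List.cons_append, List.nil_append]

theorem sp1 (c : Char) (hc : PySem.Chars.isspace c = true) (t : List Char) :
    PySem.Chars.split₀ (c :: t) = PySem.Chars.split₀ t := by
  rw [PySem.Chars.split₀, PySem.Chars.split₀, PySem.Chars.split₀.go]
  simp [hc]

theorem sp3 (buf : List Char) (hb : ∀ c ∈ buf, PySem.Chars.isspace c = false) :
    PySem.Chars.split₀ buf = if buf = [] then [] else [buf] := by
  rw [PySem.Chars.split₀, show buf = buf ++ [] by simp, go_word buf hb [] [] []]
  by_cases h : buf = []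
  · simp [h, PySem.Chars.split₀.go]
  · rw [PySem.Chars.split₀.go]
    simp [h, List.isEmpty_iff]

theorem sp2 (buf : List Char) (hb0 : buf ≠ []) (hb : ∀ c ∈ buf, PySem.Chars.isspace c = false)
    (c : Char) (hc : PySem.Chars.isspace c = true) (t : List Char) :
    PySem.Chars.split₀ (buf ++ c :: t) = buf :: PySem.Chars.split₀ t := by
  rw [PySem.Chars.split₀, go_word buf hb (c :: t) [] [], PySem.Chars.split₀.go]
  simp only [List.append_nil, hc, if_true]
  rw [if_neg (by simp [List.isEmpty_iff, hb0])]
  rw [go_acc]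
  simp [PySem.Chars.split₀]

theorem spAll (s : List Char) (hs : ∀ c ∈ s, PySem.Chars.isspace c = true) :
    PySem.Chars.split₀ s = [] := by
  induction s with
  | nil => rfl
  | cons c t ih =>
    rw [sp1 c (hs c (by simp)) t]
    exact ih fun d hd => hs d (by simp [hd])

theorem strip_nil_split₀ (s : List Char) (h : PySem.Chars.strip s = []) :
    PySem.Chars.split₀ s = [] := by
  apply spAll
  intro c hc
  by_contra hns
  rw [PySem.Chars.strip, PySem.Chars.rstrip, PySem.Chars.lstrip] at h
  rw [List.reverse_eq_nil_iff, List.dropWhile_eq_nil_iff] at h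
  have : c ∈ List.dropWhile PySem.Chars.isspace s := by
    have hsplit := List.takeWhile_append_dropWhile (p := PySem.Chars.isspace) (l := s)
    rcases List.mem_append.mp (hsplit ▸ hc) with h1 | h2
    · exact absurd (List.mem_takeWhile_imp h1) hns
    · exact h2
  have := h c (by simpa using this)
  simp [this] at hns

theorem scanB_q_end (seg : List Char) (hq : '"' ∉ seg) :
    ∀ (skip : Bool) (buf : List Char) (acc : List (List Char)),
    scanB seg true skip buf acc = acc ++ [buf ++ seg] := by
  induction seg with
  | nil => intro skip buf acc; simp [scanB]
  | cons c t ih =>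
    intro skip buf acc
    have hc : c ≠ '"' := fun e => hq (by simp [e])
    rw [scanB]
    simp only [if_pos rfl, hc, if_false]
    rw [ih (fun h => hq (by simp [h])) skip (buf ++ [c]) acc]
    simp

theorem scanB_q_quote (seg : List Char) (hq : '"' ∉ seg) :
    ∀ (rest : List Char) (skip : Bool) (buf : List Char) (acc : List (List Char)),
    scanB (seg ++ '"' :: rest) true skip buf acc = scanB rest false skip [] (acc ++ [buf ++ seg]) := by
  induction seg with
  | nil => intro rest skip buf acc; rw [List.nil_append, scanB]; simp
  | cons c t ih =>
    intro rest skip buf acc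
    have hc : c ≠ '"' := fun e => hq (by simp [e])
    rw [List.cons_append, scanB]
    simp only [if_pos rfl, hc, if_false]
    rw [ih (fun h => hq (by simp [h])) rest skip (buf ++ [c]) acc]
    simp

theorem scanB_u_end (seg : List Char) (hq : '"' ∉ seg) :
    ∀ (skip : Bool) (buf : List Char), (∀ c ∈ buf, PySem.Chars.isspace c = false) →
    ∀ (acc : List (List Char)),
    scanB seg false skip buf acc
      = acc ++ (if skip then (PySem.Chars.split₀ (buf ++ seg)).drop 1 else PySem.Chars.split₀ (buf ++ seg)) := by
  induction seg with
  | nil =>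
    intro skip buf hb acc
    rw [scanB, List.append_nil, sp3 buf hb]
    rcases skip with _ | _ <;> by_cases hbuf : buf = [] <;> simp [hbuf]
  | cons c t ih =>
    intro skip buf hb acc
    have hc : c ≠ '"' := fun e => hq (by simp [e])
    have hq' : '"' ∉ t := fun h => hq (by simp [h])
    rw [scanB]
    simp only [Bool.false_eq_true, if_false, hc]
    by_cases hs : PySem.Chars.isspace c
    · simp only [hs, if_true]
      by_cases hbuf : buf = []
      · subst hbuf
        simp only [ne_eq, not_true_eq_false, if_false, List.nil_append]
        rw [ih hq' skip [] (by simp) acc, sp1 c hs t]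
        simp
      · simp only [ne_eq, hbuf, not_false_eq_true, if_true]
        rw [sp2 buf hbuf hb c hs t]
        rcases skip with _ | _ <;>
          simp only [Bool.false_eq_true, if_false, if_true]
        · rw [ih hq' false [] (by simp) (acc ++ [buf])]
          simp
        · rw [ih hq' false [] (by simp) acc]
          simp
    · simp only [hs, Bool.false_eq_true, if_false]
      rw [ih hq' skip (buf ++ [c]) (by
        intro d hd
        rcases List.mem_append.mp hd with h1 | h1
        · exact hb d h1
        · simp at h1; subst h1; simpa using hs) acc]
      simp

theorem scanB_u_quote (seg : List Char) (hq : '"' ∉ seg) :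
    ∀ (rest : List Char) (skip : Bool) (buf : List Char), (∀ c ∈ buf, PySem.Chars.isspace c = false) →
    ∀ (acc : List (List Char)),
    scanB (seg ++ '"' :: rest) false skip buf acc
      = scanB rest true false []
          (acc ++ (if skip then (PySem.Chars.split₀ (buf ++ seg)).drop 1 else PySem.Chars.split₀ (buf ++ seg))) := by
  induction seg with
  | nil =>
    intro rest skip buf hb acc
    rw [List.nil_append, scanB, List.append_nil, sp3 buf hb]
    simp only [Bool.false_eq_true, if_false, if_pos rfl]
    rcases skip with _ | _ <;> by_cases hbuf : buf = [] <;> simp [hbuf]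
  | cons c t ih =>
    intro rest skip buf hb acc
    have hc : c ≠ '"' := fun e => hq (by simp [e])
    have hq' : '"' ∉ t := fun h => hq (by simp [h])
    rw [List.cons_append, scanB]
    simp only [Bool.false_eq_true, if_false, hc]
    by_cases hs : PySem.Chars.isspace c
    · simp only [hs, if_true]
      by_cases hbuf : buf = []
      · subst hbuf
        simp only [ne_eq, not_true_eq_false, if_false, List.nil_append]
        rw [ih hq' rest skip [] (by simp) acc, sp1 c hs t]
        simp
      · simp only [ne_eq, hbuf, not_false_eq_true, if_true]
        rw [sp2 buf hbuf hb c hs t]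
        rcases skip with _ | _ <;>
          simp only [Bool.false_eq_true, if_false, if_true]
        · rw [ih hq' rest false [] (by simp) (acc ++ [buf])]
          simp
        · rw [ih hq' rest false [] (by simp) acc]
          simp
    · simp only [hs, Bool.false_eq_true, if_false]
      rw [ih hq' rest skip (buf ++ [c]) (by
        intro d hd
        rcases List.mem_append.mp hd with h1 | h1
        · exact hb d h1
        · simp at h1; subst h1; simpa using hs) acc]
      simp

def altp : Bool → List (List Char) → List (List Char)
  | _, [] => []
  | true, s :: ss => s :: altp false ss
  | false, s :: ss => PySem.Chars.split₀ s ++ altp true ss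

theorem scanB_alt (segs : List (List Char)) : segs ≠ [] → (∀ s ∈ segs, '"' ∉ s) →
    ∀ (q : Bool) (acc : List (List Char)),
    scanB (joinQ segs) q false [] acc = acc ++ altp q segs := by
  induction segs with
  | nil => intro h; exact absurd rfl h
  | cons s ss ih =>
    intro _ hqf q acc
    have hs : '"' ∉ s := hqf s (by simp)
    cases ss with
    | nil =>
      rcases q with _ | _
      · rw [show joinQ [s] = s from rfl, scanB_u_end s hs false [] (by simp) acc]
        simp [altp]
      · rw [show joinQ [s] = s from rfl, scanB_q_end s hs false [] acc]
        simp [altp]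
    | cons s' ss' =>
      have hj : joinQ (s :: s' :: ss') = s ++ '"' :: joinQ (s' :: ss') := rfl
      have hih := ih (by simp) (fun x hx => hqf x (by simp [hx]))
      rcases q with _ | _
      · rw [hj, scanB_u_quote s hs (joinQ (s' :: ss')) false [] (by simp) acc]
        simp only [Bool.false_eq_true, if_false, List.nil_append]
        rw [hih true (acc ++ PySem.Chars.split₀ s)]
        simp [altp]
      · rw [hj, scanB_q_quote s hs (joinQ (s' :: ss')) false [] acc]
        simp only [List.nil_append]
        rw [hih false (acc ++ [s])]
        simp [altp]

theorem scanB_main (cs : List Char) :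
    scanB cs false true [] []
      = (PySem.Chars.split₀ ((splitQ cs).headD [])).drop 1 ++ altp true (splitQ cs).tail := by
  obtain ⟨s0, rest, hsq⟩ := List.exists_cons_of_ne_nil (splitQ_ne_nil cs)
  have hqf := splitQ_quote_free cs
  rw [hsq] at hqf
  have hs0 : '"' ∉ s0 := hqf s0 (by simp)
  have hcs : cs = joinQ (s0 :: rest) := by rw [← hsq, joinQ_splitQ]
  rw [hsq]
  simp only [List.headD_cons, List.tail_cons]
  cases rest with
  | nil =>
    rw [hcs, show joinQ [s0] = s0 from rfl, scanB_u_end s0 hs0 true [] (by simp) []]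
    simp [altp]
  | cons s1 rest' =>
    rw [hcs, show joinQ (s0 :: s1 :: rest') = s0 ++ '"' :: joinQ (s1 :: rest') from rfl,
      scanB_u_quote s0 hs0 (joinQ (s1 :: rest')) true [] (by simp) []]
    simp only [if_true, List.nil_append]
    rw [scanB_alt (s1 :: rest') (by simp) (fun x hx => hqf x (by simp [hx])) true
      (List.drop 1 (PySem.Chars.split₀ s0))]

def altpA : Bool → List (List Char) → List (List Char)
  | _, [] => []
  | true, s :: ss => s :: altpA false ss
  | false, s :: ss =>
      (if PySem.Chars.strip s ≠ [] then PySem.Chars.split₀ s else []) ++ altpA true ss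

theorem altpA_eq (b : Bool) (ss : List (List Char)) : altpA b ss = altp b ss := by
  induction ss generalizing b with
  | nil => cases b <;> rfl
  | cons s t ih =>
    cases b with
    | true => rw [altpA, altp, ih]
    | false =>
      rw [altpA, altp, ih]
      by_cases h : PySem.Chars.strip s = []
      · rw [if_neg (by simpa using h), strip_nil_split₀ s h]
      · rw [if_pos (by simpa using h)]

theorem imod2 (i : Nat) : PySem.Int.mod (i : Int) 2 = ((i % 2 : Nat) : Int) := by
  simp [PySem.Int.mod, Int.fmod_eq_emod_of_nonneg]

theorem foldA (qs : List (List Char)) : ∀ (n i : Nat), qs.length - i = n →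
    ∀ (args : List (List Char)),
    (PySem.List.pyRange (i : Int) (qs.length : Int)).foldl
      (fun args j =>
        if PySem.Int.mod j 2 == 0 then
          if PySem.Chars.strip (PySem.List.pyGetD qs j []) ≠ [] then
            args ++ PySem.Chars.split₀ (PySem.List.pyGetD qs j [])
          else args
        else
          args ++ [PySem.List.pyGetD qs j []]) args
      = args ++ altpA (i % 2 == 1) (qs.drop i) := by
  intro n
  induction n with
  | zero =>
    intro i hn args
    rw [PySem.List.pyRange_one_eq_nil (by omega), List.drop_of_length_le (by omega)]
    cases h : (i % 2 == 1) <;> simp [altpA]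
  | succ m ih =>
    intro i hn args
    have hi : i < qs.length := by omega
    rw [PySem.List.pyRange_one_cons (by exact_mod_cast hi)]
    rw [List.foldl_cons]
    rw [show ((i : Int) + 1) = ((i + 1 : Nat) : Int) by push_cast; ring]
    rw [ih (i + 1) (by omega)]
    rw [List.drop_eq_getElem_cons hi]
    have hget : PySem.List.pyGetD qs (i : Int) [] = qs[i] := by
      rw [PySem.List.pyGetD_natCast, List.getD_eq_getElem qs [] hi]
    rw [imod2 i]
    by_cases hp : i % 2 = 0
    · have h1 : ((i % 2 : Nat) : Int) == 0 := by simp [hp]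
      have h2 : ((i + 1) % 2 == 1) = true := by simp; omega
      have h3 : (i % 2 == 1) = false := by simp [hp]
      rw [h2, h3]
      simp only [h1, if_true, hget, altpA]
      by_cases hst : PySem.Chars.strip qs[i] = []
      · rw [if_neg (by simpa using hst), if_neg (by simpa using hst)]
        simp
      · rw [if_pos (by simpa using hst), if_pos (by simpa using hst)]
        simp
    · have h1 : (((i % 2 : Nat) : Int) == 0) = false := by simp; omega
      have h2 : ((i + 1) % 2 == 1) = false := by simp; omega
      have h3 : (i % 2 == 1) = true := by simp; omega
      rw [h2, h3]
      simp only [h1, Bool.false_eq_true, if_false, hget, altpA]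
      simp

theorem fetchA_eq (cs : List Char) :
    fetch_arguments (String.ofList cs) =
      ((PySem.Chars.split₀ ((splitQ cs).headD [])).drop 1 ++ altp true (splitQ cs).tail).map String.ofList := by
  unfold fetch_arguments
  simp only [String.toList_ofList, splitOn_eq_splitQ]
  obtain ⟨s0, rest, hsq⟩ := List.exists_cons_of_ne_nil (splitQ_ne_nil cs)
  rw [hsq]
  have hfold := foldA (s0 :: rest) ((s0 :: rest).length - 1) 1 rfl
    ((PySem.Chars.split₀ (PySem.List.pyGetD (s0 :: rest) 0 [])).drop 1)
  simp only [Nat.cast_one] at hfold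
  rw [hfold]
  rw [show PySem.List.pyGetD (s0 :: rest) (0 : Int) [] = s0 by
    rw [show (0 : Int) = ((0 : Nat) : Int) from rfl, PySem.List.pyGetD_natCast]; rfl]
  simp only [List.drop_one, List.headD_cons, List.tail_cons, altpA_eq]
  rfl

theorem fetchB_eq (cs : List Char) :
    fetch_arguments_alt (String.ofList cs) =
      ((PySem.Chars.split₀ ((splitQ cs).headD [])).drop 1 ++ altp true (splitQ cs).tail).map String.ofList := by
  unfold fetch_arguments_alt
  rw [String.toList_ofList, scanB_main]

-- ===== VERDICT (by name: the statement is the Claim_ definition above) =====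
theorem fetch_arguments_spec : Claim_equal_fetch_arguments := by
  intro m _
  unfold Spec_fetch_arguments
  have h := (fetchA_eq m.toList).trans (fetchB_eq m.toList).symm
  rwa [String.ofList_toList] at h
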